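-- pv_equiv track=rewrite | github.com/daisyden/ai_for_validation | opencode/issue_triage/issue_analysis/generate_issue_report.py | build_reporter_action_types
-- ===== SOURCE A (Python) =====
-- def build_reporter_action_types(issues: list) -> list:
--     """Get Action TBD values for Reporter AR (all except Need Investigation).
--
--     Returns list of (action_tbd_name, list_of_issues) tuples.
--     """
--     reporter_types = [
--         'Needs Upstream Skip PR',
--         'add to skiplist',
--         'Close fixed issue',
--         'Verify the issue',
--         'Awaiting response',
--         'Awaiting response from reporter',
--         'E2E accuracy issue',
--     ]
--     type_map = {}
--     for issue in issues:
--         action_tbd = issue.get('Action TBD', '') or ''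
--         if action_tbd and action_tbd != 'Need Investigation':
--             if action_tbd not in type_map:
--                 type_map[action_tbd] = []
--             type_map[action_tbd].append(issue)
--
--     # Return only types that have issues, in the defined order
--     result = []
--     for action in reporter_types:
--         if action in type_map and type_map[action]:
--             result.append((action, type_map[action]))
--     return result
-- ===== SOURCE B (Python) =====
-- def build_reporter_action_types(issues: list) -> list:
--     """Get Action TBD values for Reporter AR (all except Need Investigation).
--
--     Returns list of (action_tbd_name, list_of_issues) tuples.
--     """
--     reporter_types = [
--         'Needs Upstream Skip PR',
--         'add to skiplist',
--         'Close fixed issue',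
--         'Verify the issue',
--         'Awaiting response',
--         'Awaiting response from reporter',
--         'E2E accuracy issue',
--     ]
--     result = []
--     for action in reporter_types:
--         matched = [i for i in issues if (i.get('Action TBD', '') or '') == action]
--         if matched:
--             result.append((action, matched))
--     return result
-- ===== Notes on version B (the rewrite author's own statement) =====
-- stated objective: simpler
-- what changed: Drops the intermediate grouping dict entirely: for each of the 7 fixed action types B scans the issues once with a comprehension (order-preserving) and keeps the pair only when the match list is non-empty.
import Mathlib
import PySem

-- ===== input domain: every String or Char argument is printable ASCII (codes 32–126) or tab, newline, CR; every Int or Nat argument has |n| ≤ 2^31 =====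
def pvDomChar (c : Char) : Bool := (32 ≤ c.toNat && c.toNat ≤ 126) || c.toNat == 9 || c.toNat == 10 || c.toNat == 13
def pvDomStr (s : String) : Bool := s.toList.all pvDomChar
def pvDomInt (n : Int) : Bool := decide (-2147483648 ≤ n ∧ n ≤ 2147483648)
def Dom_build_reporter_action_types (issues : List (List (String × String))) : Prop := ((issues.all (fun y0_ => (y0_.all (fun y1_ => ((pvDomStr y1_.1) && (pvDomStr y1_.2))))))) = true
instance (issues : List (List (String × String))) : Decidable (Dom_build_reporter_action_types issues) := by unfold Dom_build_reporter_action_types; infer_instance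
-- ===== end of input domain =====

-- B replaces A's one-pass grouping dict by a direct per-type scan of the issues (simpler; same result).

-- ===== PORT A =====
-- shared helper: `issue.get('Action TBD', '') or ''` (both Pythons use this exact expression)
def pvAction (issue : List (String × String)) : String :=
  let a := (PySem.Dict.mk issue).getD "Action TBD" ""
  if a == "" then "" else a

def pvReporterTypes : List String :=
  ["Needs Upstream Skip PR", "add to skiplist", "Close fixed issue", "Verify the issue",
   "Awaiting response", "Awaiting response from reporter", "E2E accuracy issue"]

-- body of A's first loop: conditional key creation then append (list append = overwrite-insert)
def pvStepA (d : PySem.Dict String (List (List (String × String)))) (issue : List (String × String)) :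
    PySem.Dict String (List (List (String × String))) :=
  let action_tbd := pvAction issue
  if action_tbd != "" && action_tbd != "Need Investigation" then
    let d1 := if d.contains action_tbd then d else d.insert action_tbd []
    d1.insert action_tbd (d1.getD action_tbd [] ++ [issue])
  else d

def build_reporter_action_types (issues : List (List (String × String))) : List (String × (List (List (String × String)))) :=
  let type_map := issues.foldl pvStepA PySem.Dict.empty
  pvReporterTypes.foldl (fun result action =>
    if type_map.contains action && !(type_map.getD action []).isEmpty then
      result ++ [(action, type_map.getD action [])]
    else result) []

-- ===== PORT B =====
def build_reporter_action_types_alt (issues : List (List (String × String))) : List (String × (List (List (String × String)))) :=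
  pvReporterTypes.filterMap (fun action =>
    let matched := issues.filter (fun i => pvAction i == action)
    if matched.isEmpty then none else some (action, matched))

-- ===== PRECONDITION & SPEC =====
def Spec_build_reporter_action_types (issues : List (List (String × String))) (out : List (String × (List (List (String × String))))) : Prop := out = build_reporter_action_types_alt issues
instance (issues : List (List (String × String))) (out : List (String × (List (List (String × String))))) : Decidable (Spec_build_reporter_action_types issues out) := by unfold Spec_build_reporter_action_types; infer_instance

-- ===== CLAIM (what is proved, stated in full; the proofs are below) =====
def Claim_equal_build_reporter_action_types : Prop := ∀ (issues : List (List (String × String))), Dom_build_reporter_action_types issues → Spec_build_reporter_action_types issues (build_reporter_action_types issues)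

-- ===== LEMMAS AND PROOFS =====

-- invariant of A's grouping loop: the value at a reporter key is the ordered filter
theorem getD_foldA (k : String) (hk : k ≠ "" ∧ k ≠ "Need Investigation") :
    ∀ (issues : List (List (String × String))) (d : PySem.Dict String (List (List (String × String)))),
      (issues.foldl pvStepA d).getD k [] = d.getD k [] ++ issues.filter (fun i => pvAction i == k) := by
  intro issues
  induction issues with
  | nil => intro d; simp
  | cons i rest ih =>
    intro d
    simp only [List.foldl_cons, List.filter_cons]
    rw [ih]
    by_cases hik : pvAction i = k
    · have hcond : (pvAction i != "" && pvAction i != "Need Investigation") = true := by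
        simp [hik, hk.1, hk.2]
      have hflt : (pvAction i == k) = true := by simp [hik]
      simp only [pvStepA, hflt, if_true]
      rw [if_pos hcond]
      by_cases hc : d.contains (pvAction i) = true
      · rw [if_pos hc, hik]
        simp [PySem.Dict.getD_insert_self]
      · rw [if_neg hc]
        simp only [Bool.not_eq_true] at hc
        rw [hik] at hc ⊢
        rw [PySem.Dict.getD_insert_self, PySem.Dict.getD_insert_self]
        have h0 : d.getD k ([] : List (List (String × String))) = [] :=
          PySem.Dict.getD_of_not_contains _ _ hc
        rw [h0]
        simp
    · have hne : k ≠ pvAction i := Ne.symm hik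
      have hflt : (pvAction i == k) = false := by simp [hik]
      simp only [pvStepA, hflt, Bool.false_eq_true, if_false]
      have hstep : (if (pvAction i != "" && pvAction i != "Need Investigation") = true then
          (if d.contains (pvAction i) = true then d else d.insert (pvAction i) []).insert (pvAction i)
            ((if d.contains (pvAction i) = true then d else d.insert (pvAction i) []).getD (pvAction i) [] ++ [i])
          else d).getD k [] = d.getD k [] := by
        split_ifs with h1 h2
        · simp [PySem.Dict.getD_insert, hne]
        · simp [PySem.Dict.getD_insert, hne]
        · rfl
      exact congrArg (· ++ rest.filter (fun i => pvAction i == k)) hstep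

theorem contains_foldA (k : String) (hk : k ≠ "" ∧ k ≠ "Need Investigation") :
    ∀ (issues : List (List (String × String))) (d : PySem.Dict String (List (List (String × String)))),
      (issues.foldl pvStepA d).contains k = (d.contains k || !(issues.filter (fun i => pvAction i == k)).isEmpty) := by
  intro issues
  induction issues with
  | nil => intro d; simp
  | cons i rest ih =>
    intro d
    simp only [List.foldl_cons, List.filter_cons]
    rw [ih]
    by_cases hik : pvAction i = k
    · have hcond : (pvAction i != "" && pvAction i != "Need Investigation") = true := by
        simp [hik, hk.1, hk.2]
      have hflt : (pvAction i == k) = true := by simp [hik]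
      simp only [pvStepA, hflt, if_true]
      rw [if_pos hcond]
      by_cases hc : d.contains (pvAction i) = true
      · rw [if_pos hc, hik]
        simp
      · rw [if_neg hc, hik]
        simp
    · have hne : k ≠ pvAction i := Ne.symm hik
      have hflt : (pvAction i == k) = false := by simp [hik]
      simp only [pvStepA, hflt, Bool.false_eq_true, if_false]
      congr 1
      split_ifs with h1 h2
      · simp [PySem.Dict.contains_insert, hne]
      · simp [PySem.Dict.contains_insert, hne]
      · rfl

-- A's output loop (append-if) as a filterMap
theorem foldl_if_append {α β : Type} (c : α → Bool) (f : α → β) :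
    ∀ (ts : List α) (r0 : List β),
      ts.foldl (fun r a => if c a then r ++ [f a] else r) r0
        = r0 ++ ts.filterMap (fun a => if c a then some (f a) else none) := by
  intro ts
  induction ts with
  | nil => intro r0; simp
  | cons t rest ih =>
    intro r0
    simp only [List.foldl_cons, List.filterMap_cons]
    by_cases hc : c t = true
    · simp [hc, ih]
    · simp only [Bool.not_eq_true] at hc
      simp [hc, ih]

-- ===== VERDICT (by name: the statement is the Claim_ definition above) =====
theorem build_reporter_action_types_spec : Claim_equal_build_reporter_action_types := by
  intro issues _
  unfold Spec_build_reporter_action_types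
  unfold build_reporter_action_types build_reporter_action_types_alt
  rw [foldl_if_append]
  rw [List.nil_append]
  apply List.filterMap_congr
  intro action ha
  have hk : action ≠ "" ∧ action ≠ "Need Investigation" := by
    fin_cases ha <;> exact ⟨by decide, by decide⟩
  have h1 := getD_foldA action hk issues PySem.Dict.empty
  have h2 := contains_foldA action hk issues PySem.Dict.empty
  simp only [PySem.Dict.getD_empty, PySem.Dict.contains_empty, List.nil_append, Bool.false_or] at h1 h2
  rw [h1, h2]
  by_cases hm : (issues.filter (fun i => pvAction i == action)).isEmpty = true
  · simp [hm]
  · simp only [Bool.not_eq_true] at hm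
    simp [hm]
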